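-- pv_equiv track=rewrite | github.com/sandialabs/pyGSTi | pygsti/report/report.py | _add_new_estimate_labels
-- ===== SOURCE A (Python) =====
-- ROBUST_SUFFIX_LIST = [".robust", ".Robust", ".robust+", ".Robust+", ".wildcard"]
--
-- def _add_new_estimate_labels(running_lbls, estimates, combine_robust):
--     """
--     Like _add_new_labels but perform robust-suffix processing.
--
--     In particular, if `combine_robust == True` then do not add
--     labels which have a ".robust" counterpart.
--     """
--     current_lbls = list(estimates.keys())
--
--     def _add_lbl(lst, lbl):
--         if combine_robust and any([(lbl + suffix in current_lbls)
--                                    for suffix in ROBUST_SUFFIX_LIST]):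
--             return  # don't add label
--         lst.append(lbl)  # add label
--
--     if running_lbls is None:
--         running_lbls = []
--
--     if running_lbls != current_lbls:
--         for lbl in current_lbls:
--             if lbl not in running_lbls:
--                 _add_lbl(running_lbls, lbl)
--
--     return running_lbls
-- ===== SOURCE B (Python) =====
-- ROBUST_SUFFIX_LIST = [".robust", ".Robust", ".robust+", ".Robust+", ".wildcard"]
--
-- def _add_new_estimate_labels(running_lbls, estimates, combine_robust):
--     """Two-pass rewrite: invert the 'lbl + suffix in current_lbls' probes into a
--     precomputed skip-set of stripped base labels, then append in one pass with a
--     seen-set (mutates running_lbls in place, like the original)."""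
--     current_lbls = list(estimates.keys())
--
--     skip = set()
--     if combine_robust:
--         for c in current_lbls:
--             for suffix in ROBUST_SUFFIX_LIST:
--                 if c.endswith(suffix):
--                     skip.add(c[:-len(suffix)])
--
--     if running_lbls is None:
--         running_lbls = []
--
--     if running_lbls != current_lbls:
--         seen = set(running_lbls)
--         for lbl in current_lbls:
--             if lbl not in seen and lbl not in skip:
--                 running_lbls.append(lbl)
--                 seen.add(lbl)
--
--     return running_lbls
-- ===== Notes on version B (the rewrite author's own statement) =====
-- stated objective: faster
-- what changed: Instead of probing 'lbl + suffix in current_lbls' for every label (a linear list scan per label per suffix), B makes one pass that strips robust suffixes off the labels themselves to build a skip-set of base labels, then appends in a single pass guarded by a seen-set.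
import Mathlib
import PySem

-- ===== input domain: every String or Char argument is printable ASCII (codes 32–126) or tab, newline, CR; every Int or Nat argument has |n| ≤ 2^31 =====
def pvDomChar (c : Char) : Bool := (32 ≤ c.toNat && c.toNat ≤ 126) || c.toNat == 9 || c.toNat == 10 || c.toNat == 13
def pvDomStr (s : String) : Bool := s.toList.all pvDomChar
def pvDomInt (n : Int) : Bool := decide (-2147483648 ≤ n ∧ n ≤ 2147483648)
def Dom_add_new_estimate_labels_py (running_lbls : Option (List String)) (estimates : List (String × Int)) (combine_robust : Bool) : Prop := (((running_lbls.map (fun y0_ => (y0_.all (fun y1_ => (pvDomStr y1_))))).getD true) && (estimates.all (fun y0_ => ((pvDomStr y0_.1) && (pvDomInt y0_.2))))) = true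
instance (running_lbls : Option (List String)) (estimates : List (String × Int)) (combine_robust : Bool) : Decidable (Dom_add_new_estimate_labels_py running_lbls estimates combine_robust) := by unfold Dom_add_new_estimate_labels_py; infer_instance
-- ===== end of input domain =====

-- B replaces A's per-label 'lbl + suffix in current_lbls' list probes by a precomputed
-- skip-set of suffix-stripped base labels plus a seen-set for the append pass (objective: faster).
-- Note: the Python A mutates running_lbls in place (appends); the Python B performs the same
-- mutation; the equivalence proved here is about the return value.

def pvRobustSuffixes : List String := [".robust", ".Robust", ".robust+", ".Robust+", ".wildcard"]

-- ===== PORT A =====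
def add_new_estimate_labels_py (running_lbls : Option (List String)) (estimates : List (String × Int)) (combine_robust : Bool) : List String :=
  let current_lbls := PySem.List.dedup (estimates.map Prod.fst)   -- list(estimates.keys())
  let running := running_lbls.getD []                             -- None -> []
  if running ≠ current_lbls then
    current_lbls.foldl (fun lst lbl =>
      if lbl ∈ lst then lst
      else if combine_robust && pvRobustSuffixes.any (fun suffix => current_lbls.contains (lbl ++ suffix)) then lst
      else lst ++ [lbl]) running
  else running

-- ===== PORT B =====
-- c[:-len(suffix)]  (exact Python slice semantics via PySem)
def pvStripSuffix (c suffix : String) : String :=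
  PySem.Str.slice c none (some (-(PySem.Str.len suffix : Int)))

def add_new_estimate_labels_py_alt (running_lbls : Option (List String)) (estimates : List (String × Int)) (combine_robust : Bool) : List String :=
  let current_lbls := PySem.List.dedup (estimates.map Prod.fst)   -- list(estimates.keys())
  let skip : PySem.Set String :=
    if combine_robust then
      current_lbls.foldl (fun s c =>
        pvRobustSuffixes.foldl (fun s suffix =>
          if PySem.Str.endswith c suffix then PySem.Set.add s (pvStripSuffix c suffix) else s) s)
        PySem.Set.empty
    else PySem.Set.empty
  let running := running_lbls.getD []                             -- None -> []
  if running ≠ current_lbls then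
    (current_lbls.foldl (fun (p : List String × PySem.Set String) lbl =>
        if !(PySem.Set.contains p.2 lbl) && !(PySem.Set.contains skip lbl) then
          (p.1 ++ [lbl], PySem.Set.add p.2 lbl)
        else p)
      (running, PySem.Set.ofList running)).1
  else running

-- ===== PRECONDITION & SPEC =====
def Spec_add_new_estimate_labels_py (running_lbls : Option (List String)) (estimates : List (String × Int)) (combine_robust : Bool) (out : List String) : Prop := out = add_new_estimate_labels_py_alt running_lbls estimates combine_robust
instance (running_lbls : Option (List String)) (estimates : List (String × Int)) (combine_robust : Bool) (out : List String) : Decidable (Spec_add_new_estimate_labels_py running_lbls estimates combine_robust out) := by unfold Spec_add_new_estimate_labels_py; infer_instance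

-- ===== CLAIM (what is proved, stated in full; the proofs are below) =====
def Claim_equal_add_new_estimate_labels_py : Prop := ∀ (running_lbls : Option (List String)) (estimates : List (String × Int)) (combine_robust : Bool), Dom_add_new_estimate_labels_py running_lbls estimates combine_robust → Spec_add_new_estimate_labels_py running_lbls estimates combine_robust (add_new_estimate_labels_py running_lbls estimates combine_robust)

-- ===== LEMMAS AND PROOFS =====

-- splitting a concatenation: cs = ls ++ ss iff ss is a suffix of cs and stripping it leaves ls
theorem pv_append_eq_iff (cs ls ss : List Char) :
    ls ++ ss = cs ↔ (ss <:+ cs ∧ cs.take (cs.length - ss.length) = ls) := by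
  constructor
  · rintro rfl
    refine ⟨⟨ls, rfl⟩, ?_⟩
    simp
  · rintro ⟨⟨p, rfl⟩, h⟩
    simp at h
    rw [h]

-- string form: lbl ++ suffix = c  iff  c.endswith(suffix) and c[:-len(suffix)] = lbl
theorem pv_strip_iff (c lbl suffix : String) (hs : suffix ≠ "") :
    lbl ++ suffix = c ↔ (PySem.Str.endswith c suffix = true ∧ pvStripSuffix c suffix = lbl) := by
  have hk : 0 < suffix.toList.length := by
    cases h : suffix.toList with
    | nil => exact absurd (String.toList_inj.mp h) hs
    | cons a l => simp
  have hstrip : (pvStripSuffix c suffix).toList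
      = c.toList.take (c.toList.length - suffix.toList.length) := by
    unfold pvStripSuffix
    rw [PySem.Str.toList_slice, PySem.Str.len_eq, PySem.Chars.slice_eq_listSlice,
        PySem.List.slice_to_neg_natCast _ _ hk]
  rw [← String.toList_inj, show (lbl ++ suffix).toList = lbl.toList ++ suffix.toList from by simp,
      pv_append_eq_iff, PySem.Str.endswith_eq, PySem.Chars.endswith_iff,
      ← String.toList_inj (s₁ := pvStripSuffix c suffix), hstrip]

-- membership in the inner suffix fold
theorem pv_mem_inner (c : String) (ss : List String) (s : PySem.Set String) (y : String) :
    y ∈ ss.foldl (fun s suffix =>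
        if PySem.Str.endswith c suffix then PySem.Set.add s (pvStripSuffix c suffix) else s) s ↔
      y ∈ s ∨ ∃ suffix ∈ ss, PySem.Str.endswith c suffix = true ∧ pvStripSuffix c suffix = y := by
  induction ss generalizing s with
  | nil => simp
  | cons hd tl ih =>
    simp only [List.foldl_cons]
    by_cases h : PySem.Str.endswith c hd = true
    · rw [if_pos h, ih]
      simp [PySem.Set.mem_add]
      tauto
    · rw [if_neg h, ih]
      rw [PySem.Str.endswith_eq] at h
      simp [h]

-- membership in the skip-set fold
theorem pv_mem_skip (l ss : List String) (s : PySem.Set String) (y : String) :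
    y ∈ l.foldl (fun s c => ss.foldl (fun s suffix =>
        if PySem.Str.endswith c suffix then PySem.Set.add s (pvStripSuffix c suffix) else s) s) s ↔
      y ∈ s ∨ ∃ c ∈ l, ∃ suffix ∈ ss, PySem.Str.endswith c suffix = true ∧ pvStripSuffix c suffix = y := by
  induction l generalizing s with
  | nil => simp
  | cons hd tl ih =>
    simp only [List.foldl_cons]
    rw [ih, pv_mem_inner]
    simp only [List.mem_cons, exists_eq_or_imp]
    constructor
    · rintro ((h | h) | h)
      · exact Or.inl h
      · exact Or.inr (Or.inl h)
      · exact Or.inr (Or.inr h)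
    · rintro (h | h | h)
      · exact Or.inl (Or.inl h)
      · exact Or.inl (Or.inr h)
      · exact Or.inr h

-- each robust suffix is nonempty
theorem pv_suffix_ne (suffix : String) (h : suffix ∈ pvRobustSuffixes) : suffix ≠ "" := by
  fin_cases h <;> decide

-- A's robust guard equals membership in B's skip-set
theorem pv_guard_iff (current_lbls : List String) (combine_robust : Bool) (lbl : String) :
    (combine_robust && pvRobustSuffixes.any (fun suffix => current_lbls.contains (lbl ++ suffix))) = true ↔
      lbl ∈ (if combine_robust then
          current_lbls.foldl (fun s c => pvRobustSuffixes.foldl (fun s suffix =>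
            if PySem.Str.endswith c suffix then PySem.Set.add s (pvStripSuffix c suffix) else s) s)
          PySem.Set.empty
        else PySem.Set.empty) := by
  cases combine_robust with
  | false => simp [PySem.Set.empty]
  | true =>
    simp only [Bool.true_and, if_pos, List.any_eq_true, List.contains_iff_mem]
    rw [pv_mem_skip]
    simp only [PySem.Set.empty, List.not_mem_nil, false_or]
    constructor
    · rintro ⟨suffix, hsuf, hmem⟩
      exact ⟨lbl ++ suffix, hmem, suffix, hsuf,
        ((pv_strip_iff (lbl ++ suffix) lbl suffix (pv_suffix_ne suffix hsuf)).mp rfl)⟩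
    · rintro ⟨c, hc, suffix, hsuf, hend, hstrip⟩
      exact ⟨suffix, hsuf,
        ((pv_strip_iff c lbl suffix (pv_suffix_ne suffix hsuf)).mpr ⟨hend, hstrip⟩) ▸ hc⟩

-- main fold correspondence
theorem pv_fold_eq (current_lbls : List String) (combine_robust : Bool)
    (skip : PySem.Set String)
    (hskip : ∀ y, (combine_robust && pvRobustSuffixes.any (fun suffix => current_lbls.contains (y ++ suffix))) = true ↔ y ∈ skip) :
    ∀ (l lst : List String) (seen : PySem.Set String), (∀ y, y ∈ seen ↔ y ∈ lst) →
    (l.foldl (fun (p : List String × PySem.Set String) lbl =>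
        if !(PySem.Set.contains p.2 lbl) && !(PySem.Set.contains skip lbl) then
          (p.1 ++ [lbl], PySem.Set.add p.2 lbl)
        else p) (lst, seen)).1 =
    l.foldl (fun lst lbl =>
      if lbl ∈ lst then lst
      else if combine_robust && pvRobustSuffixes.any (fun suffix => current_lbls.contains (lbl ++ suffix)) then lst
      else lst ++ [lbl]) lst := by
  intro l
  induction l with
  | nil => intro lst seen _; rfl
  | cons hd tl ih =>
    intro lst seen hinv
    simp only [List.foldl_cons]
    by_cases hmem : hd ∈ lst
    · have h1 : PySem.Set.contains seen hd = true := (PySem.Set.contains_iff seen hd).mpr ((hinv hd).mpr hmem)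
      rw [if_pos hmem]
      simp only [h1, Bool.not_true, Bool.false_and, Bool.false_eq_true, if_false]
      exact ih lst seen hinv
    · have h1 : PySem.Set.contains seen hd = false := by
        rw [← Bool.not_eq_true, PySem.Set.contains_iff]
        exact fun h => hmem ((hinv hd).mp h)
      rw [if_neg hmem]
      by_cases hg : (combine_robust && pvRobustSuffixes.any (fun suffix => current_lbls.contains (hd ++ suffix))) = true
      · have h2 : PySem.Set.contains skip hd = true := (PySem.Set.contains_iff skip hd).mpr ((hskip hd).mp hg)
        rw [if_pos hg]
        simp only [h1, h2, Bool.not_false, Bool.not_true, Bool.true_and, Bool.false_eq_true, if_false]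
        exact ih lst seen hinv
      · have h2 : PySem.Set.contains skip hd = false := by
          rw [← Bool.not_eq_true, PySem.Set.contains_iff]
          exact fun h => hg ((hskip hd).mpr h)
        rw [if_neg hg]
        simp only [h1, h2, Bool.not_false, Bool.true_and, if_true]
        refine ih (lst ++ [hd]) (PySem.Set.add seen hd) ?_
        intro y
        rw [PySem.Set.mem_add]
        simp [hinv y]
  
-- ===== VERDICT (by name: the statement is the Claim_ definition above) =====
theorem add_new_estimate_labels_py_spec : Claim_equal_add_new_estimate_labels_py := by
  intro running_lbls estimates combine_robust _
  unfold Spec_add_new_estimate_labels_py add_new_estimate_labels_py add_new_estimate_labels_py_alt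
  simp only []
  by_cases hne : running_lbls.getD [] ≠ PySem.List.dedup (estimates.map Prod.fst)
  · rw [if_pos hne, if_pos hne]
    rw [pv_fold_eq _ combine_robust _ (fun y => pv_guard_iff _ combine_robust y)]
    exact fun y => PySem.Set.mem_ofList _ y
  · rw [if_neg hne, if_neg hne]
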